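-- pv_equiv track=rewrite | github.com/MrBrantCode/unitest_baseline | mut_generate/mist_train_cf/cf_6957/solution.py | filter_unwanted_words
-- ===== SOURCE A (Python) =====
-- def filter_unwanted_words(paragraph, unwanted_words):
--     """
--     Filter out unwanted words from a given paragraph of text, ignoring case sensitivity.
--
--     Parameters:
--     paragraph (str): The input paragraph to be filtered.
--     unwanted_words (dict): A dictionary of language-specific unwanted words where each key is a language code and its corresponding value is a set of unwanted words.
--
--     Returns:
--     str: The filtered paragraph after removing the unwanted words.
--     """
--
--     # Language Detection
--     common_words = {
--         'en': {'the', 'and', 'a', 'of', 'to'},  # Add more common words for each language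
--         'es': {'de', 'la', 'que', 'el', 'en'},  # Add more common words for each language
--         # Add more languages as needed
--     }
--
--     words = paragraph.split()
--     language_counts = {lang: sum(1 for word in words if word.lower() in common_words[lang]) for lang in common_words}
--     detected_language = max(language_counts, key=language_counts.get)
--
--     # Filtering
--     filtered_words = []
--     unwanted_words_set = set(unwanted_words.get(detected_language, set()))
--
--     for word in words:
--         if word.lower() not in unwanted_words_set:
--             filtered_words.append(word)
--
--     return ' '.join(filtered_words)
-- ===== SOURCE B (Python) =====
-- def filter_unwanted_words(paragraph, unwanted_words):
--     words = paragraph.split()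
--     # one pass: frequency table of lowercased words
--     freq = {}
--     for w in words:
--         lw = w.lower()
--         freq[lw] = freq.get(lw, 0) + 1
--     # score each language by summing lookups over its tiny common-word list
--     common_words = {
--         'en': ['the', 'and', 'a', 'of', 'to'],
--         'es': ['de', 'la', 'que', 'el', 'en'],
--     }
--     best_lang, best_score = '', -1
--     for lang, cws in common_words.items():
--         score = sum(freq.get(cw, 0) for cw in cws)
--         if score > best_score:
--             best_lang, best_score = lang, score
--     unwanted = set(unwanted_words.get(best_lang, ()))
--     return ' '.join(w for w in words if w.lower() not in unwanted)
-- ===== Notes on version B (the rewrite author's own statement) =====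
-- stated objective: alternative
-- what changed: B builds a frequency table over the lowercased words in one pass and scores each language by summing lookups over its five common words (argmax kept by a running best in insertion order), instead of rescanning the whole word list once per language; filtering is a single comprehension.
import Mathlib
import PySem

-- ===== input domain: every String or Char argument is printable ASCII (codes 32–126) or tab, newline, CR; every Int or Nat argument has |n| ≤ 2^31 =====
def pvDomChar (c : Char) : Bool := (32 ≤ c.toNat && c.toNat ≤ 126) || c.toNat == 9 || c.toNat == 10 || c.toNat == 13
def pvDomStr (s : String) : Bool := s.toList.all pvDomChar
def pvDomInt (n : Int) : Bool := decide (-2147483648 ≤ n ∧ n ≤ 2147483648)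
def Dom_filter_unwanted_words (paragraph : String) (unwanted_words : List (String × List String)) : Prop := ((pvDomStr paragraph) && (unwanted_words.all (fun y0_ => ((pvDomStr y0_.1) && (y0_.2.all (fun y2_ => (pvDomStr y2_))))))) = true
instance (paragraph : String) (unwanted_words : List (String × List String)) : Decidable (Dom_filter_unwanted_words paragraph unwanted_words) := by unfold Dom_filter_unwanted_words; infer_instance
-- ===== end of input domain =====

-- B replaces A's per-language rescans of the whole word list by one frequency table
-- over the lowercased words, scored by lookups over each language's five common words.

-- ===== PORT A =====
def filter_unwanted_words (paragraph : String) (unwanted_words : List (String × List String)) : String :=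
  let common_words : PySem.Dict String (PySem.Set String) :=
    PySem.Dict.ofList [("en", PySem.Set.ofList ["the","and","a","of","to"]),
                       ("es", PySem.Set.ofList ["de","la","que","el","en"])]
  let words := PySem.Str.split₀ paragraph
  let language_counts : PySem.Dict String Int :=
    PySem.Dict.ofList (common_words.keys.map (fun lang =>
      (lang, (words.map (fun word =>
        if PySem.Set.contains (common_words.getD lang PySem.Set.empty) (PySem.Str.lower word)
        then (1 : Int) else 0)).sum)))
  -- max over the (nonempty, literal) dict's keys; getD "" is never used
  let detected_language :=
    (PySem.List.max? language_counts.keys (fun lang => language_counts.getD lang 0)).getD ""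
  let unwanted_words_set : PySem.Set String :=
    PySem.Set.ofList ((PySem.Dict.mk unwanted_words).getD detected_language [])
  let filtered_words := words.foldl (fun acc word =>
    if !PySem.Set.contains unwanted_words_set (PySem.Str.lower word) then acc ++ [word] else acc) []
  PySem.Str.join " " filtered_words

-- ===== PORT B =====
def filter_unwanted_words_alt (paragraph : String) (unwanted_words : List (String × List String)) : String :=
  let words := PySem.Str.split₀ paragraph
  let freq : PySem.Dict String Int :=
    words.foldl (fun d w =>
      let lw := PySem.Str.lower w
      d.insert lw (d.getD lw 0 + 1)) PySem.Dict.empty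
  let common_words : List (String × List String) :=
    [("en", ["the","and","a","of","to"]), ("es", ["de","la","que","el","en"])]
  let best := common_words.foldl (fun (acc : String × Int) p =>
      let score := (p.2.map (fun cw => freq.getD cw 0)).sum
      if score > acc.2 then (p.1, score) else acc) ("", -1)
  let unwanted : PySem.Set String :=
    PySem.Set.ofList ((PySem.Dict.mk unwanted_words).getD best.1 [])
  PySem.Str.join " " (words.filter (fun w => !PySem.Set.contains unwanted (PySem.Str.lower w)))

-- ===== PRECONDITION & SPEC =====
def Spec_filter_unwanted_words (paragraph : String) (unwanted_words : List (String × List String)) (out : String) : Prop := out = filter_unwanted_words_alt paragraph unwanted_words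
instance (paragraph : String) (unwanted_words : List (String × List String)) (out : String) : Decidable (Spec_filter_unwanted_words paragraph unwanted_words out) := by unfold Spec_filter_unwanted_words; infer_instance

-- ===== CLAIM (what is proved, stated in full; the proofs are below) =====
def Claim_equal_filter_unwanted_words : Prop := ∀ (paragraph : String) (unwanted_words : List (String × List String)), Dom_filter_unwanted_words paragraph unwanted_words → Spec_filter_unwanted_words paragraph unwanted_words (filter_unwanted_words paragraph unwanted_words)

-- ===== LEMMAS AND PROOFS =====

theorem ind_sum (S : List String) (hS : S.Nodup) (lw : String) :
    (S.map (fun c => if lw = c then (1:Int) else 0)).sum = if lw ∈ S then 1 else 0 := by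
  induction S with
  | nil => simp
  | cons c T ih =>
    rcases List.nodup_cons.mp hS with ⟨hc, hT⟩
    by_cases h : lw = c
    · subst h; simp [hc, ih hT]
    · simp [h, ih hT]

theorem count_sum (S : List String) (hS : S.Nodup) (lws : List String) :
    (lws.map (fun lw => if PySem.Set.contains (PySem.Set.ofList S) lw then (1:Int) else 0)).sum
      = (S.map (fun c => ((lws.count c : Nat) : Int))).sum := by
  induction lws with
  | nil => simp
  | cons lw t ih =>
    simp only [List.map_cons, List.sum_cons, ih]
    have h1 : PySem.Set.contains (PySem.Set.ofList S) lw = true ↔ lw ∈ S := by simp [pysem]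
    calc (if PySem.Set.contains (PySem.Set.ofList S) lw then (1:Int) else 0) + (S.map (fun c => ((t.count c : Nat) : Int))).sum
        = (S.map (fun c => if lw = c then (1:Int) else 0)).sum + (S.map (fun c => ((t.count c : Nat) : Int))).sum := by
          rw [ind_sum S hS lw]
          by_cases h : lw ∈ S
          · rw [if_pos (h1.mpr h), if_pos h]
          · rw [if_neg (fun hc => h (h1.mp hc)), if_neg h]
      _ = (S.map (fun c => (((lw :: t).count c : Nat) : Int))).sum := by
          rw [← List.sum_map_add]
          apply congrArg
          apply List.map_congr_left
          intro c _
          by_cases h : lw = c <;> (simp [h]; try ring)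


theorem dict2_keys (a b : Int) :
    (PySem.Dict.ofList [("en",a),("es",b)]).keys = ["en","es"] := by
  simp [PySem.Dict.ofList, PySem.Dict.update, PySem.Dict.insert, PySem.Dict.contains,
    PySem.Dict.empty, PySem.Dict.keys]

theorem dict2_getD_en (a b : Int) :
    (PySem.Dict.ofList [("en",a),("es",b)]).getD "en" 0 = a := by
  simp [PySem.Dict.ofList, PySem.Dict.update, PySem.Dict.insert, PySem.Dict.contains,
    PySem.Dict.empty, PySem.Dict.getD, PySem.Dict.get?]

theorem dict2_getD_es (a b : Int) :
    (PySem.Dict.ofList [("en",a),("es",b)]).getD "es" 0 = b := by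
  simp [PySem.Dict.ofList, PySem.Dict.update, PySem.Dict.insert, PySem.Dict.contains,
    PySem.Dict.empty, PySem.Dict.getD, PySem.Dict.get?]

theorem max2 (f : String → Int) :
    PySem.List.max? ["en","es"] f = if f "en" < f "es" then some "es" else some "en" := by
  simp only [PySem.List.max?, List.foldl_cons, List.foldl_nil]

theorem filter_unwanted_words_spec : Claim_equal_filter_unwanted_words := by
  unfold Claim_equal_filter_unwanted_words
  intro paragraph unwanted_words _
  unfold Spec_filter_unwanted_words
  unfold filter_unwanted_words filter_unwanted_words_alt
  dsimp only
  have hfreq : ∀ v : String,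
      ((PySem.Str.split₀ paragraph).foldl (fun d w =>
        d.insert (PySem.Str.lower w) (d.getD (PySem.Str.lower w) 0 + 1)) (PySem.Dict.empty : PySem.Dict String Int)).getD v 0
      = ((((PySem.Str.split₀ paragraph).map PySem.Str.lower).count v : Nat) : Int) := by
    intro v
    rw [show (PySem.Str.split₀ paragraph).foldl (fun (d : PySem.Dict String Int) w => d.insert (PySem.Str.lower w) (d.getD (PySem.Str.lower w) 0 + 1)) PySem.Dict.empty
        = ((PySem.Str.split₀ paragraph).map PySem.Str.lower).foldl (fun (d : PySem.Dict String Int) x => d.insert x (d.getD x 0 + 1)) PySem.Dict.empty from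
      (List.foldl_map (f := PySem.Str.lower) (g := fun (d : PySem.Dict String Int) x => d.insert x (d.getD x 0 + 1)) (l := PySem.Str.split₀ paragraph) (init := PySem.Dict.empty)).symm]
    rw [PySem.Dict.getD_foldl_insert_add_one]
    simp [PySem.Dict.getD, PySem.Dict.get?, PySem.Dict.empty]
  -- literal common_words dict reductions
  rw [show (PySem.Dict.ofList [("en", PySem.Set.ofList ["the","and","a","of","to"]),
        ("es", PySem.Set.ofList ["de","la","que","el","en"])] : PySem.Dict String (PySem.Set String)).keys
      = ["en","es"] from by decide]
  simp only [List.map_cons, List.map_nil]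
  have h_en : (PySem.Dict.ofList [("en", PySem.Set.ofList ["the","and","a","of","to"]),
        ("es", PySem.Set.ofList ["de","la","que","el","en"])] : PySem.Dict String (PySem.Set String)).getD "en" PySem.Set.empty
      = PySem.Set.ofList ["the","and","a","of","to"] := by decide
  have h_es : (PySem.Dict.ofList [("en", PySem.Set.ofList ["the","and","a","of","to"]),
        ("es", PySem.Set.ofList ["de","la","que","el","en"])] : PySem.Dict String (PySem.Set String)).getD "es" PySem.Set.empty
      = PySem.Set.ofList ["de","la","que","el","en"] := by decide
  simp only [h_en, h_es]
  simp only [dict2_keys, dict2_getD_en, dict2_getD_es, max2]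
  simp only [List.foldl_cons, List.foldl_nil]
  simp only [hfreq]
  simp only [List.map_cons, List.map_nil, List.sum_cons, List.sum_nil]
  have hen : (List.map (fun word => if (PySem.Set.ofList ["the","and","a","of","to"]).contains (PySem.Str.lower word) = true then (1:Int) else 0) (PySem.Str.split₀ paragraph)).sum
      = ((["the","and","a","of","to"] : List String).map (fun c => ((((PySem.Str.split₀ paragraph).map PySem.Str.lower).count c : Nat) : Int))).sum := by
    rw [show (List.map (fun word => if (PySem.Set.ofList ["the","and","a","of","to"]).contains (PySem.Str.lower word) = true then (1:Int) else 0) (PySem.Str.split₀ paragraph))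
        = (List.map (fun lw => if (PySem.Set.ofList ["the","and","a","of","to"]).contains lw = true then (1:Int) else 0) ((PySem.Str.split₀ paragraph).map PySem.Str.lower)) from by rw [List.map_map]; rfl]
    exact count_sum _ (by decide) _
  have hes : (List.map (fun word => if (PySem.Set.ofList ["de","la","que","el","en"]).contains (PySem.Str.lower word) = true then (1:Int) else 0) (PySem.Str.split₀ paragraph)).sum
      = ((["de","la","que","el","en"] : List String).map (fun c => ((((PySem.Str.split₀ paragraph).map PySem.Str.lower).count c : Nat) : Int))).sum := by
    rw [show (List.map (fun word => if (PySem.Set.ofList ["de","la","que","el","en"]).contains (PySem.Str.lower word) = true then (1:Int) else 0) (PySem.Str.split₀ paragraph))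
        = (List.map (fun lw => if (PySem.Set.ofList ["de","la","que","el","en"]).contains lw = true then (1:Int) else 0) ((PySem.Str.split₀ paragraph).map PySem.Str.lower)) from by rw [List.map_map]; rfl]
    exact count_sum _ (by decide) _
  simp only [hen, hes, List.map_cons, List.map_nil, List.sum_cons, List.sum_nil]
  have h0 : (0:Int) ≤ ↑(List.count "the" (List.map PySem.Str.lower (PySem.Str.split₀ paragraph))) +
      (↑(List.count "and" (List.map PySem.Str.lower (PySem.Str.split₀ paragraph))) +
        (↑(List.count "a" (List.map PySem.Str.lower (PySem.Str.split₀ paragraph))) +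
          (↑(List.count "of" (List.map PySem.Str.lower (PySem.Str.split₀ paragraph))) +
            (↑(List.count "to" (List.map PySem.Str.lower (PySem.Str.split₀ paragraph))) + 0)))) := by
    omega
  generalize hE : (↑(List.count "the" (List.map PySem.Str.lower (PySem.Str.split₀ paragraph))) +
      (↑(List.count "and" (List.map PySem.Str.lower (PySem.Str.split₀ paragraph))) +
        (↑(List.count "a" (List.map PySem.Str.lower (PySem.Str.split₀ paragraph))) +
          (↑(List.count "of" (List.map PySem.Str.lower (PySem.Str.split₀ paragraph))) +
            (↑(List.count "to" (List.map PySem.Str.lower (PySem.Str.split₀ paragraph))) + 0)))) : Int) = e at h0 ⊢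
  generalize (↑(List.count "de" (List.map PySem.Str.lower (PySem.Str.split₀ paragraph))) +
      (↑(List.count "la" (List.map PySem.Str.lower (PySem.Str.split₀ paragraph))) +
        (↑(List.count "que" (List.map PySem.Str.lower (PySem.Str.split₀ paragraph))) +
          (↑(List.count "el" (List.map PySem.Str.lower (PySem.Str.split₀ paragraph))) +
            (↑(List.count "en" (List.map PySem.Str.lower (PySem.Str.split₀ paragraph))) + 0)))) : Int) = s
  rw [if_pos (show e > -1 from by omega)]
  by_cases h : e < s
  · simp only [if_pos h, Option.getD_some]
    rw [PySem.List.foldl_append_if_eq_filter]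
    rfl
  · simp only [if_neg h, Option.getD_some]
    rw [PySem.List.foldl_append_if_eq_filter]
    rfl
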